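-- pv_equiv track=rewrite | github.com/nekoTheShadow/my_answers_of_yukicoder | 0115.py | f
-- ===== SOURCE A (Python) =====
-- def ok(lo, hi, k, d):
--     if hi - lo + 1 < k:
--         return False
--
--     mi = 0
--     mx = 0
--     for i in range(k):
--         mi += lo + i
--         mx += hi - i
--     return mi <= d <= mx
--
-- def f(n, d, k):
--     if not ok(1, n, k, d):
--         return [-1]
--
--     lo = 1
--     ans = []
--     while k > 0:
--         if ok(lo + 1, n, k - 1, d - lo):
--             ans.append(lo)
--             k -= 1
--             d -= lo
--         lo += 1
--
--     return ans
-- ===== SOURCE B (Python) =====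
-- def f(n, d, k):
--     def ssum(a, b):
--         # sum of the integers a..b (0 if the range is empty)
--         return (a + b) * (b - a + 1) // 2 if a <= b else 0
--
--     def feasible(lo, j, s):
--         # can j distinct integers from [lo, n] sum to s?
--         return n - lo + 1 >= j and ssum(lo, lo + j - 1) <= s <= ssum(n - j + 1, n)
--
--     if not feasible(1, k, d):
--         return [-1]
--
--     ans = []
--     lo = 1
--     while k > 0:
--         t = ssum(n - k + 2, n)      # largest possible sum of the remaining k-1 picks
--         v = max(lo, d - t)          # smallest feasible next pick, in closed form
--         ans.append(v)
--         d -= v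
--         lo = v + 1
--         k -= 1
--     return ans
-- ===== Notes on version B (the rewrite author's own statement) =====
-- stated objective: faster
-- what changed: Replaces A's per-candidate linear scan (an O(k) summation loop inside a while loop that tries every candidate value) with closed-form arithmetic-series sums: feasibility is one formula and each of the k picks is computed directly as max(lo, d - topsum(k-1)).
import Mathlib
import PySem

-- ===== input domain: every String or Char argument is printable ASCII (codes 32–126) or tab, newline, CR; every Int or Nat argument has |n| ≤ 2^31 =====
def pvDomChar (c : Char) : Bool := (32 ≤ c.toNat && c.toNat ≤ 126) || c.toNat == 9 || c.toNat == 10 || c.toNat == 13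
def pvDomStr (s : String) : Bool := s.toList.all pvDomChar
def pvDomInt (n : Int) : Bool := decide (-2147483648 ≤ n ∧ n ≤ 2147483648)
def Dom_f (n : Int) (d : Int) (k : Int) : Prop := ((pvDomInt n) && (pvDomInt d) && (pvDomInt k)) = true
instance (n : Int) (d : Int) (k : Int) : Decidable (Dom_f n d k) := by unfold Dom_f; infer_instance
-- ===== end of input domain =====

-- B replaces A's per-candidate O(k) summation loop and candidate-by-candidate scan with
-- closed-form arithmetic-series sums, computing each of the k picks directly.

-- ===== PORT A =====
-- Python 'ok(lo, hi, k, d)': length check, then mi/mx accumulated over range(k).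
def okA (lo hi k d : Int) : Bool :=
  if hi - lo + 1 < k then false
  else
    let p := (PySem.List.pyRange 0 k 1).foldl
      (fun (p : Int × Int) i => (p.1 + (lo + i), p.2 + (hi - i))) (0, 0)
    decide (p.1 ≤ d ∧ d ≤ p.2)

-- A's 'while k > 0' loop; the fuel only makes the recursion total (one unit per iteration,
-- each iteration does lo += 1; on admitted inputs the loop stops with lo ≤ n + 1 ≤ 2^31 + 1,
-- so fuel 2^33 is never exhausted).
def fLoopA (n : Int) (fuel : Nat) (lo k d : Int) (ans : List Int) : List Int :=
  if k > 0 then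
    match fuel with
    | 0 => ans
    | fuel' + 1 =>
      if okA (lo + 1) n (k - 1) (d - lo) then
        fLoopA n fuel' (lo + 1) (k - 1) (d - lo) (ans ++ [lo])
      else
        fLoopA n fuel' (lo + 1) k d ans
  else ans

def f (n : Int) (d : Int) (k : Int) : List Int :=
  if !okA 1 n k d then [-1]
  else fLoopA n (2 ^ 33) 1 k d []

-- ===== PORT B =====
-- sum of the integers a..b (0 if the range is empty)
def ssum (a b : Int) : Int :=
  if a ≤ b then PySem.Int.floordiv ((a + b) * (b - a + 1)) 2 else 0

-- can j distinct integers from [lo, n] sum to s?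
def feasibleB (n lo j s : Int) : Bool :=
  decide (n - lo + 1 ≥ j ∧ ssum lo (lo + j - 1) ≤ s ∧ s ≤ ssum (n - j + 1) n)

-- B's 'while k > 0' loop: k decreases by exactly 1 each iteration, so it is recursion on k.toNat.
def fLoopB (n : Int) (cnt : Nat) (lo d : Int) (ans : List Int) : List Int :=
  match cnt with
  | 0 => ans
  | c + 1 =>
    let k : Int := (c : Int) + 1
    let t := ssum (n - k + 2) n
    let v := max lo (d - t)
    fLoopB n c (v + 1) (d - v) (ans ++ [v])

def f_alt (n : Int) (d : Int) (k : Int) : List Int :=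
  if !feasibleB n 1 k d then [-1]
  else fLoopB n k.toNat 1 d []

-- ===== PRECONDITION & SPEC =====
def Spec_f (n : Int) (d : Int) (k : Int) (out : List Int) : Prop := out = f_alt n d k
instance (n : Int) (d : Int) (k : Int) (out : List Int) : Decidable (Spec_f n d k out) := by unfold Spec_f; infer_instance

-- ===== CLAIM (what is proved, stated in full; the proofs are below) =====
def Claim_equal_f : Prop := ∀ (n : Int) (d : Int) (k : Int), Dom_f n d k → Spec_f n d k (f n d k)

-- ===== LEMMAS AND PROOFS =====

-- closed form of A's mi/mx fold (stated doubled, to avoid division)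
lemma foldA_closed (m : Nat) (lo hi : Int) :
    2 * ((PySem.List.pyRange 0 (m : Int) 1).foldl
      (fun (p : Int × Int) i => (p.1 + (lo + i), p.2 + (hi - i))) (0, 0)).1
      = 2 * (m : Int) * lo + (m : Int) * ((m : Int) - 1)
    ∧ 2 * ((PySem.List.pyRange 0 (m : Int) 1).foldl
      (fun (p : Int × Int) i => (p.1 + (lo + i), p.2 + (hi - i))) (0, 0)).2
      = 2 * (m : Int) * hi - (m : Int) * ((m : Int) - 1) := by
  induction m with
  | zero => simp [PySem.List.pyRange_one_eq_nil]
  | succ c ih =>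
    have h : PySem.List.pyRange 0 ((c : Int) + 1) 1
        = PySem.List.pyRange 0 (c : Int) 1 ++ [(c : Int)] :=
      PySem.List.pyRange_one_succ_right (by positivity)
    push_cast
    rw [h, List.foldl_append]
    push_cast at ih
    obtain ⟨ih1, ih2⟩ := ih
    simp only [List.foldl]
    constructor <;> nlinarith [ih1, ih2]

-- characterization of okA for nonnegative k (doubled inequalities)
lemma okA_iff (lo hi k d : Int) (hk : 0 ≤ k) :
    okA lo hi k d = true ↔
      hi - lo + 1 ≥ k ∧ 2 * k * lo + k * (k - 1) ≤ 2 * d ∧ 2 * d ≤ 2 * k * hi - k * (k - 1) := by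
  have hcast : ((k.toNat : Nat) : Int) = k := Int.toNat_of_nonneg hk
  obtain ⟨h1, h2⟩ := foldA_closed k.toNat lo hi
  rw [hcast] at h1 h2
  unfold okA
  split
  · simp only [Bool.false_eq_true, false_iff]
    rintro ⟨ha, -, -⟩; omega
  · simp only [decide_eq_true_eq]
    constructor
    · rintro ⟨ha, hb⟩
      refine ⟨by omega, by linarith, by linarith⟩
    · rintro ⟨ha, hb, hc⟩
      exact ⟨by linarith, by linarith⟩

-- doubled closed form of ssum
lemma ssum_double (a b : Int) : 2 * ssum a b = if a ≤ b then (a + b) * (b - a + 1) else 0 := by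
  unfold ssum
  split
  · rw [PySem.Int.floordiv_eq_ediv_of_pos (by norm_num)]
    have hdvd : (2 : Int) ∣ (a + b) * (b - a + 1) := by
      rcases Int.even_or_odd (a + b) with he | ho
      · exact Dvd.dvd.mul_right he.two_dvd _
      · obtain ⟨m, hm⟩ := ho
        exact Dvd.dvd.mul_left ⟨m - a + 1, by omega⟩ _
    obtain ⟨c, hc⟩ := hdvd
    rw [hc, Int.mul_ediv_cancel_left c (by norm_num)]
  · ring

lemma ssum_lower (lo j : Int) (hj : 0 ≤ j) :
    2 * ssum lo (lo + j - 1) = 2 * j * lo + j * (j - 1) := by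
  rw [ssum_double]
  rcases eq_or_lt_of_le hj with h | h
  · rw [if_neg (by omega)]; rw [← h]; ring
  · rw [if_pos (by omega)]; ring

lemma ssum_upper (n j : Int) (hj : 0 ≤ j) :
    2 * ssum (n - j + 1) n = 2 * j * n - j * (j - 1) := by
  rw [ssum_double]
  rcases eq_or_lt_of_le hj with h | h
  · rw [if_neg (by omega)]; rw [← h]; ring
  · rw [if_pos (by omega)]; ring

-- characterization of feasibleB for nonnegative j
lemma feasibleB_iff (n lo j s : Int) (hj : 0 ≤ j) :
    feasibleB n lo j s = true ↔
      n - lo + 1 ≥ j ∧ 2 * j * lo + j * (j - 1) ≤ 2 * s ∧ 2 * s ≤ 2 * j * n - j * (j - 1) := by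
  have e1 := ssum_lower lo j hj
  have e2 := ssum_upper n j hj
  unfold feasibleB
  simp only [decide_eq_true_eq]
  constructor
  · rintro ⟨a, b, c⟩; exact ⟨a, by linarith, by linarith⟩
  · rintro ⟨a, b, c⟩; exact ⟨a, by linarith, by linarith⟩

-- the two feasibility tests agree on all integer inputs
lemma okA_eq_feasibleB (n lo k d : Int) : okA lo n k d = feasibleB n lo k d := by
  rw [Bool.eq_iff_iff]
  rcases le_or_gt 0 k with hk | hk
  · rw [okA_iff _ _ _ _ hk, feasibleB_iff _ _ _ _ hk]
  · unfold okA feasibleB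
    have hr : PySem.List.pyRange 0 k 1 = [] := PySem.List.pyRange_one_eq_nil (by omega)
    have e1 : ssum lo (lo + k - 1) = 0 := by unfold ssum; rw [if_neg (by omega)]
    have e2 : ssum (n - k + 1) n = 0 := by unfold ssum; rw [if_neg (by omega)]
    rw [hr, e1, e2]
    split
    · simp only [Bool.false_eq_true, false_iff, decide_eq_true_eq]
      rintro ⟨ha, -, -⟩; omega
    · simp only [List.foldl, decide_eq_true_eq]
      constructor
      · rintro ⟨a, b⟩; exact ⟨by omega, a, b⟩
      · rintro ⟨-, a, b⟩; exact ⟨a, b⟩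

-- unfolding lemmas for fLoopA
lemma fLoopA_nonpos (n : Int) (fuel : Nat) (lo k d : Int) (ans : List Int) (hk : ¬ k > 0) :
    fLoopA n fuel lo k d ans = ans := by
  unfold fLoopA; rw [if_neg hk]

lemma fLoopA_succ (n : Int) (fuel : Nat) (lo k d : Int) (ans : List Int) (hk : k > 0) :
    fLoopA n (fuel + 1) lo k d ans =
      if okA (lo + 1) n (k - 1) (d - lo) then
        fLoopA n fuel (lo + 1) (k - 1) (d - lo) (ans ++ [lo])
      else
        fLoopA n fuel (lo + 1) k d ans := by
  conv_lhs => unfold fLoopA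
  rw [if_pos hk]

-- skipping phase: while every candidate below v is rejected, fLoopA just advances lo
lemma fLoopA_skip (n k d v : Int) (hk : k > 0) :
    ∀ (j rest : Nat) (lo : Int) (ans : List Int), lo + (j : Int) = v →
      (∀ w : Int, lo ≤ w → w < v → okA (w + 1) n (k - 1) (d - w) = false) →
      fLoopA n (j + rest) lo k d ans = fLoopA n rest v k d ans := by
  intro j
  induction j with
  | zero => intro rest lo ans hv _; simp at hv; rw [hv, Nat.zero_add]
  | succ c ih =>
    intro rest lo ans hv hskip
    have hlt : lo < v := by push_cast at hv; omega
    have hstep : (c + 1) + rest = (c + rest) + 1 := by omega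
    rw [hstep, fLoopA_succ _ _ _ _ _ _ hk, if_neg (by rw [hskip lo le_rfl hlt]; simp)]
    exact ih rest (lo + 1) ans (by push_cast at hv ⊢; omega)
      (fun w hw1 hw2 => hskip w (by omega) hw2)

-- the main loop lemma: from any feasible state, A's scan loop equals B's direct loop
lemma loop_eq (kn : Nat) : ∀ (n lo d : Int) (fuel : Nat) (ans : List Int),
    okA lo n (kn : Int) d = true → n + 1 - lo ≤ (fuel : Int) →
    fLoopA n fuel lo (kn : Int) d ans = fLoopB n kn lo d ans := by
  induction kn with
  | zero => intro n lo d fuel ans _ _; rw [fLoopA_nonpos _ _ _ _ _ _ (by norm_num)]; rfl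
  | succ c ih =>
    intro n lo d fuel ans H hfuel
    set k : Int := (c : Int) + 1 with hkdef
    have hcast : (((c + 1 : Nat)) : Int) = k := by push_cast; rfl
    rw [hcast] at H ⊢
    have hk0 : (0 : Int) < k := by positivity
    obtain ⟨h1, h2, h3⟩ := (okA_iff lo n k d (by omega)).mp H
    -- closed form of the top-(k-1) sum
    have hT : 2 * ssum (n - k + 2) n = 2 * (k - 1) * n - (k - 1) * (k - 2) := by
      have := ssum_upper n (k - 1) (by omega)
      have e : n - (k - 1) + 1 = n - k + 2 := by ring
      rw [e] at this
      linarith [this]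
    set T : Int := ssum (n - k + 2) n with hTdef
    set v : Int := max lo (d - T) with hvdef
    have hvlo : lo ≤ v := le_max_left _ _
    have hvd : d - T ≤ v := le_max_right _ _
    -- the next pick fits below n - k + 1
    have hvn : v ≤ n - k + 1 := by
      apply max_le (by omega)
      nlinarith [h3, hT]
    -- the pick at v is accepted
    have hpick : okA (v + 1) n (k - 1) (d - v) = true := by
      rw [okA_iff _ _ _ _ (by omega)]
      refine ⟨by omega, ?_, by nlinarith [hT, hvd]⟩
      rcases max_cases lo (d - T) with ⟨hveq, hge⟩ | ⟨hveq, hlt⟩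
      · rw [← hvdef] at hveq
        nlinarith [h2, hveq]
      · rw [← hvdef] at hveq
        have hnv : (0 : Int) ≤ n - k + 1 - v := by omega
        nlinarith [hT, hveq, mul_nonneg (by omega : (0:Int) ≤ k - 1) hnv]
    -- every candidate below v is rejected
    have hskip : ∀ w : Int, lo ≤ w → w < v → okA (w + 1) n (k - 1) (d - w) = false := by
      intro w hw1 hw2
      have hvD : v = d - T := by
        rcases max_cases lo (d - T) with ⟨hveq, _⟩ | ⟨hveq, _⟩ <;> rw [← hvdef] at hveq <;> omega
      rw [← Bool.not_eq_true]
      intro hcon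
      obtain ⟨-, -, c3⟩ := (okA_iff _ _ _ _ (by omega : (0:Int) ≤ k - 1)).mp hcon
      have : 2 * (d - w) ≤ 2 * T := by linarith [hT, c3]
      omega
    -- split the fuel: (v - lo) skipped candidates, one accepted pick, then the rest
    obtain ⟨j, hj⟩ : ∃ j : Nat, (j : Int) = v - lo := ⟨(v - lo).toNat, by omega⟩
    obtain ⟨rest, hrest⟩ : ∃ rest : Nat, fuel = j + (rest + 1) := by
      refine ⟨fuel - j - 1, ?_⟩
      omega
    rw [hrest, fLoopA_skip n k d v hk0 j (rest + 1) lo ans (by omega) hskip,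
      fLoopA_succ _ _ _ _ _ _ hk0, if_pos hpick]
    have e1 : k - 1 = (c : Int) := by omega
    rw [e1]
    rw [ih n (v + 1) (d - v) rest (ans ++ [v]) (by rw [← e1]; exact hpick) (by omega)]
    conv_rhs => rw [fLoopB]

-- ===== VERDICT (by name: the statement is the Claim_ definition above) =====
theorem f_spec : Claim_equal_f := by
  unfold Claim_equal_f Spec_f
  intro n d k hdom
  unfold f f_alt
  rw [okA_eq_feasibleB]
  cases hfeas : feasibleB n 1 k d with
  | false => simp
  | true =>
    simp only [Bool.not_true, Bool.false_eq_true, if_false]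
    rcases le_or_gt k 0 with hk | hk
    · rw [fLoopA_nonpos _ _ _ _ _ _ (by omega)]
      have : k.toNat = 0 := by omega
      rw [this]; rfl
    · have hcast : ((k.toNat : Nat) : Int) = k := Int.toNat_of_nonneg (by omega)
      have hdom' : n ≤ 2147483648 := by
        unfold Dom_f pvDomInt at hdom
        simp only [Bool.and_eq_true, decide_eq_true_eq] at hdom
        exact hdom.1.1.2
      have := loop_eq k.toNat n 1 d (2 ^ 33) [] (by rw [hcast, okA_eq_feasibleB]; exact hfeas) (by push_cast; omega)
      rw [hcast] at this
      exact this
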